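-- pv_equiv track=rewrite | github.com/lendkhoa/algorithm-py | algorithm_py/count_spikes.py | count_k_spikes
-- ===== SOURCE A (Python) =====
-- def count_k_spikes(prices, k) -> int:
--     n = len(prices)
--     k_spikes_count = 0
--
--     # For each element in prices, check if it's a k-Spike
--     for i in range(n):
--         left_count = sum(1 for j in range(0, i) if prices[j] < prices[i])
--         right_count = sum(1 for j in range(i + 1, n) if prices[j] < prices[i])
--
--         if left_count >= k and right_count >= k:
--             k_spikes_count += 1
--
--     return k_spikes_count
-- ===== SOURCE B (Python) =====
-- def _bisect_left(a, x):
--     lo, hi = 0, len(a)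
--     while lo < hi:
--         mid = (lo + hi) // 2
--         if a[mid] < x:
--             lo = mid + 1
--         else:
--             hi = mid
--     return lo
--
--
-- def count_k_spikes(prices, k) -> int:
--     # One forward pass keeps a sorted list of the elements seen so far;
--     # binary search gives each element's count of smaller elements to its left.
--     # The count of smaller elements in the WHOLE list (binary search in the
--     # final fully sorted list) minus the left count is the right count.
--     seen = []
--     left = []
--     for x in prices:
--         p = _bisect_left(seen, x)
--         left.append(p)
--         seen.insert(p, x)
--     count = 0
--     for x, lc in zip(prices, left):
--         if lc >= k and _bisect_left(seen, x) - lc >= k: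
--             count += 1
--     return count
-- ===== Notes on version B (the rewrite author's own statement) =====
-- stated objective: faster
-- what changed: Replaces the per-index quadratic rescans with one forward pass that maintains a sorted list (hand-written binary search + insert) to get each element's left-smaller count, and obtains the right-smaller count as (smaller count in the whole sorted list) minus the left count.
import Mathlib
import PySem

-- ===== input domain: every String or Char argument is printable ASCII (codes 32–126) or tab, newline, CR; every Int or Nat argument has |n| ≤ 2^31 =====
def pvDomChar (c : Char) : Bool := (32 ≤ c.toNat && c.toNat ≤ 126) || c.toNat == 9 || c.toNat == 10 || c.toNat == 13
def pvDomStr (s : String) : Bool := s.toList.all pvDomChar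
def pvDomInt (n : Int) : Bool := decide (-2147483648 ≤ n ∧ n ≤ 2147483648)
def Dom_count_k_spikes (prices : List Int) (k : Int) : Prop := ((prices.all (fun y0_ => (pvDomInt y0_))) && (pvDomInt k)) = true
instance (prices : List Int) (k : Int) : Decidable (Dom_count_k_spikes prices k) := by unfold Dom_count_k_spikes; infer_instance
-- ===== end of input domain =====

-- B replaces A's quadratic per-index rescans by one sorted-insertion pass with binary search
-- (left counts) and a subtraction from the whole-list smaller-count (right counts): faster.

-- ===== PORT A =====
def count_k_spikes (prices : List Int) (k : Int) : Int :=
  let n : Int := (prices.length : Int)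
  (PySem.List.pyRange 0 n 1).foldl (fun cnt i =>
    let left_count : Int :=
      (((PySem.List.pyRange 0 i 1).filter
          (fun j => PySem.List.pyGetD prices j 0 < PySem.List.pyGetD prices i 0)).length : Int)
    let right_count : Int :=
      (((PySem.List.pyRange (i+1) n 1).filter
          (fun j => PySem.List.pyGetD prices j 0 < PySem.List.pyGetD prices i 0)).length : Int)
    if left_count ≥ k ∧ right_count ≥ k then cnt + 1 else cnt) 0

-- ===== PORT B =====
-- hand-written bisect_left of Source B (while lo < hi: …)
def bisectLeftLoop (a : List Int) (x : Int) (lo hi : Nat) : Nat :=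
  if lo < hi then
    let mid := (lo + hi) / 2
    if PySem.List.pyGetD a (mid : Int) 0 < x then bisectLeftLoop a x (mid + 1) hi
    else bisectLeftLoop a x lo mid
  else lo
termination_by hi - lo
decreasing_by all_goals omega

-- the body of Source B's first loop
def step1 (st : List Int × List Int) (x : Int) : List Int × List Int :=
  let p := bisectLeftLoop st.1 x 0 st.1.length
  (PySem.List.insert st.1 (p : Int) x, st.2 ++ [(p : Int)])

def count_k_spikes_alt (prices : List Int) (k : Int) : Int :=
  let pass1 := prices.foldl step1 ([], [])
  let seen := pass1.1
  let left := pass1.2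
  (prices.zip left).foldl (fun count xl =>
      if xl.2 ≥ k ∧ ((bisectLeftLoop seen xl.1 0 seen.length : Int) - xl.2) ≥ k
      then count + 1 else count) 0

-- ===== PRECONDITION & SPEC =====
def Spec_count_k_spikes (prices : List Int) (k : Int) (out : Int) : Prop := out = count_k_spikes_alt prices k
instance (prices : List Int) (k : Int) (out : Int) : Decidable (Spec_count_k_spikes prices k out) := by unfold Spec_count_k_spikes; infer_instance

-- ===== CLAIM (what is proved, stated in full; the proofs are below) =====
def Claim_equal_count_k_spikes : Prop := ∀ (prices : List Int) (k : Int), Dom_count_k_spikes prices k → Spec_count_k_spikes prices k (count_k_spikes prices k)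

-- ===== LEMMAS AND PROOFS =====

-- reference: left counts of successive elements of `rest`, given the already-seen prefix `done`
def leftsFrom (done rest : List Int) : List Int :=
  match rest with
  | [] => []
  | x :: r => ((done.countP (fun y => decide (y < x)) : Int)) :: leftsFrom (done ++ [x]) r

-- reference count: element x with processed prefix `done` and remainder r is a spike iff
-- k ≤ #smaller-in-done and k ≤ #smaller-in-r
def refList (done rest : List Int) (k : Int) : Int :=
  match rest with
  | [] => 0
  | x :: r =>
    (if k ≤ (done.countP (fun y => decide (y < x)) : Int) ∧
        k ≤ (r.countP (fun y => decide (y < x)) : Int) then (1:Int) else 0)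
      + refList (done ++ [x]) r k

theorem sorted_lt_iff (x : Int) :
    ∀ (a : List Int), a.Pairwise (· ≤ ·) → ∀ i (h : i < a.length),
      (a[i] < x ↔ i < a.countP (fun y => decide (y < x))) := by
  intro a
  induction a with
  | nil => intro _ i h; simp at h
  | cons y t ih =>
    intro hp i h
    rcases List.pairwise_cons.mp hp with ⟨hy, ht⟩
    rcases i with _ | j
    · simp only [List.getElem_cons_zero, List.countP_cons]
      by_cases hyx : y < x
      · simp [hyx]
      · constructor
        · intro hc; exact absurd hc hyx
        · intro hc
          exfalso
          have h0 : t.countP (fun y => decide (y < x)) = 0 := by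
            rw [List.countP_eq_zero]
            intro z hz
            simp only [decide_eq_true_eq]
            have := hy z hz
            omega
          simp [hyx, h0] at hc
    · simp only [List.getElem_cons_succ, List.countP_cons]
      by_cases hyx : y < x
      · have := ih ht j (by simpa using h)
        simp [hyx]; omega
      · have h0 : t.countP (fun y => decide (y < x)) = 0 := by
          rw [List.countP_eq_zero]
          intro z hz
          simp only [decide_eq_true_eq]
          have := hy z hz
          omega
        have hjlen : j < t.length := by simpa using h
        have hj : ¬ t[j]'hjlen < x := by
          have := hy (t[j]'hjlen) (List.getElem_mem _)
          omega
        simp [hyx, h0, hj]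

theorem bisectLeftLoop_spec (a : List Int) (x : Int) (hp : a.Pairwise (· ≤ ·)) :
    ∀ lo hi, lo ≤ a.countP (fun y => decide (y < x)) →
      a.countP (fun y => decide (y < x)) ≤ hi → hi ≤ a.length →
      bisectLeftLoop a x lo hi = a.countP (fun y => decide (y < x)) := by
  intro lo hi
  induction lo, hi using bisectLeftLoop.induct a x with
  | case1 lo hi hlt mid hm ih =>
    intro h1 h2 h3
    have hmidlt : mid < a.length := by omega
    have hget : PySem.List.pyGetD a (mid : Int) 0 = a[mid] := by
      rw [PySem.List.pyGetD_natCast]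
      exact List.getD_eq_getElem a 0 hmidlt
    rw [bisectLeftLoop]
    have hiff := sorted_lt_iff x a hp mid hmidlt
    simp only [if_pos hlt]
    rw [hget] at hm ⊢
    rw [if_pos hm]
    exact ih (by have := hiff.mp hm; omega) h2 h3
  | case2 lo hi hlt mid hm ih =>
    intro h1 h2 h3
    have hmidlt : mid < a.length := by omega
    have hget : PySem.List.pyGetD a (mid : Int) 0 = a[mid] := by
      rw [PySem.List.pyGetD_natCast]
      exact List.getD_eq_getElem a 0 hmidlt
    rw [bisectLeftLoop]
    have hiff := sorted_lt_iff x a hp mid hmidlt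
    simp only [if_pos hlt]
    rw [hget] at hm ⊢
    rw [if_neg hm]
    refine ih h1 ?_ (by omega)
    have : ¬ mid < a.countP (fun y => decide (y < x)) := fun hc => hm (hiff.mpr hc)
    omega
  | case3 lo hi hge =>
    intro h1 h2 h3
    rw [bisectLeftLoop, if_neg hge]
    omega

theorem bisect_full (a : List Int) (x : Int) (hp : a.Pairwise (· ≤ ·)) :
    bisectLeftLoop a x 0 a.length = a.countP (fun y => decide (y < x)) :=
  bisectLeftLoop_spec a x hp 0 a.length (Nat.zero_le _)
    List.countP_le_length (Nat.le_refl _)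

theorem insert_at_count (a : List Int) (x : Int) (hp : a.Pairwise (· ≤ ·)) :
    (PySem.List.insert a ((a.countP (fun y => decide (y < x)) : Nat) : Int) x).Perm (x :: a) ∧
    (PySem.List.insert a ((a.countP (fun y => decide (y < x)) : Nat) : Int) x).Pairwise (· ≤ ·) := by
  set t := a.countP (fun y => decide (y < x)) with ht
  have htle : t ≤ a.length := List.countP_le_length
  rw [PySem.List.insert_natCast a t x htle]
  constructor
  · have h1 : (a.take t ++ x :: a.drop t).Perm (x :: (a.take t ++ a.drop t)) := List.perm_middle
    rw [List.take_append_drop] at h1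
    exact h1
  · have htake : ∀ u ∈ a.take t, u < x := by
      intro u hu
      rcases List.mem_take_iff_getElem.mp hu with ⟨i, hi, rfl⟩
      have hilen : i < a.length := by omega
      exact (sorted_lt_iff x a hp i hilen).mpr (by omega)
    have hdrop : ∀ v ∈ a.drop t, x ≤ v := by
      intro v hv
      rcases List.getElem_of_mem hv with ⟨i, hi, rfl⟩
      rw [List.getElem_drop]
      have hlen : t + i < a.length := by
        have : (List.drop t a).length = a.length - t := List.length_drop
        omega
      have : ¬ a[t + i] < x := by
        intro hc
        have := (sorted_lt_iff x a hp (t + i) hlen).mp hc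
        omega
      omega
    have hsplit : a.Pairwise (· ≤ ·) := hp
    rw [← List.take_append_drop t a] at hsplit
    rcases List.pairwise_append.mp hsplit with ⟨hp1, hp2, hcross⟩
    rw [List.pairwise_append]
    refine ⟨hp1, ?_, ?_⟩
    · rw [List.pairwise_cons]
      exact ⟨hdrop, hp2⟩
    · intro u hu v hv
      rcases List.mem_cons.mp hv with rfl | hv'
      · exact le_of_lt (htake u hu)
      · exact hcross u hu v hv'

theorem loop1_spec :
    ∀ (rest done s l : List Int), s.Perm done → s.Pairwise (· ≤ ·) →
      ∃ s', rest.foldl step1 (s, l)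
        = (s', l ++ leftsFrom done rest) ∧ s'.Perm (done ++ rest) ∧ s'.Pairwise (· ≤ ·) := by
  intro rest
  induction rest with
  | nil =>
    intro done s l hperm hsort
    exact ⟨s, by simp [leftsFrom], by simpa using hperm, hsort⟩
  | cons x r ih =>
    intro done s l hperm hsort
    have hbis : bisectLeftLoop s x 0 s.length = s.countP (fun y => decide (y < x)) :=
      bisect_full s x hsort
    have hcnt : s.countP (fun y => decide (y < x)) = done.countP (fun y => decide (y < x)) :=
      hperm.countP_eq _
    obtain ⟨hip, his⟩ := insert_at_count s x hsort
    rw [hcnt] at hip his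
    have hfirst : step1 (s, l) x
        = (PySem.List.insert s ((done.countP (fun y => decide (y < x)) : Nat) : Int) x,
           l ++ [((done.countP (fun y => decide (y < x)) : Nat) : Int)]) := by
      simp only [step1]
      rw [hbis, hcnt]
    have hperm' : (PySem.List.insert s ((done.countP (fun y => decide (y < x)) : Nat) : Int) x).Perm (done ++ [x]) := by
      refine hip.trans ?_
      have h1 : (x :: s).Perm (x :: done) := hperm.cons x
      have h2 : (done ++ x :: []).Perm (x :: (done ++ [])) := List.perm_middle
      simp only [List.append_nil] at h2
      exact h1.trans h2.symm
    obtain ⟨s', heq, hp', hs'⟩ := ih (done ++ [x]) _ (l ++ [((done.countP (fun y => decide (y < x)) : Nat) : Int)]) hperm' his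
    refine ⟨s', ?_, ?_, hs'⟩
    · rw [List.foldl_cons, hfirst, heq]
      simp [leftsFrom]
    · simpa using hp'

theorem loop2_spec (k : Int) :
    ∀ (rest done : List Int) (c : Int) (seen : List Int),
      seen.Perm (done ++ rest) → seen.Pairwise (· ≤ ·) →
      (rest.zip (leftsFrom done rest)).foldl (fun count xl =>
          if xl.2 ≥ k ∧ ((bisectLeftLoop seen xl.1 0 seen.length : Int) - xl.2) ≥ k
          then count + 1 else count) c
        = c + refList done rest k := by
  intro rest
  induction rest with
  | nil => intro done c seen _ _; simp [leftsFrom, refList]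
  | cons x r ih =>
    intro done c seen hperm hsort
    have hbis : bisectLeftLoop seen x 0 seen.length = seen.countP (fun y => decide (y < x)) :=
      bisect_full seen x hsort
    have hcnt : seen.countP (fun y => decide (y < x))
        = done.countP (fun y => decide (y < x)) + r.countP (fun y => decide (y < x)) := by
      rw [hperm.countP_eq _]
      simp [List.countP_append]
    have hperm' : seen.Perm ((done ++ [x]) ++ r) := by
      refine hperm.trans ?_
      simp
    simp only [leftsFrom, List.zip_cons_cons, List.foldl_cons, hbis]
    rw [ih (done ++ [x]) _ seen hperm' hsort]
    have hcond : ((done.countP (fun y => decide (y < x)) : Int) ≥ k ∧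
        ((seen.countP (fun y => decide (y < x)) : Nat) : Int) - (done.countP (fun y => decide (y < x)) : Nat) ≥ k)
        ↔ (k ≤ (done.countP (fun y => decide (y < x)) : Int) ∧
           k ≤ (r.countP (fun y => decide (y < x)) : Int)) := by
      rw [hcnt]; push_cast; omega
    rw [refList]
    split_ifs with h1 h2 h2
    · ring
    · exact absurd (hcond.mp h1) h2
    · exact absurd (hcond.mpr h2) h1
    · ring

-- A-side bridges: range-filter lengths are countP over take/drop
theorem map_pyGetD_range_take (prices : List Int) :
    ∀ m, m ≤ prices.length →
      (PySem.List.pyRange 0 (m : Int) 1).map (fun j => PySem.List.pyGetD prices j 0)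
        = prices.take m := by
  intro m
  induction m with
  | zero => intro _; simp
  | succ m ih =>
    intro h
    have : PySem.List.pyRange 0 ((m + 1 : Nat) : Int) 1
        = PySem.List.pyRange 0 (m : Int) 1 ++ [(m : Int)] := by
      push_cast
      exact PySem.List.pyRange_one_succ_right (by positivity)
    rw [this, List.map_append, ih (by omega)]
    have hm : m < prices.length := h
    simp only [List.map_cons, List.map_nil, PySem.List.pyGetD_natCast]
    rw [List.getD_eq_getElem prices 0 hm, List.take_succ]
    simp [List.getElem?_eq_getElem hm]

theorem filter_length_take (prices : List Int) (c : Int) (m : Nat) (h : m ≤ prices.length) :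
    ((PySem.List.pyRange 0 (m : Int) 1).filter
        (fun j => PySem.List.pyGetD prices j 0 < c)).length
      = (prices.take m).countP (fun y => decide (y < c)) := by
  rw [← map_pyGetD_range_take prices m h, List.countP_map]
  rw [← List.countP_eq_length_filter]
  rfl

theorem filter_length_drop (prices : List Int) (c : Int) (a : Nat) :
    ((PySem.List.pyRange (a : Int) (prices.length : Int) 1).filter
        (fun j => PySem.List.pyGetD prices j 0 < c)).length
      = (prices.drop a).countP (fun y => decide (y < c)) := by
  have hmap := PySem.List.map_pyGetD_pyRange (xs := prices) (a := (a : Int)) (d := 0)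
    (by positivity)
  simp only [PySem.List.len_eq] at hmap
  rw [← List.countP_eq_length_filter]
  have h2 : (fun j => decide (PySem.List.pyGetD prices j 0 < c))
      = (fun y => decide (y < c)) ∘ (fun j => PySem.List.pyGetD prices j 0) := rfl
  rw [h2, ← List.countP_map, hmap]
  simp

theorem loopA_spec (prices : List Int) (k : Int) :
    ∀ (rest done : List Int), prices = done ++ rest → ∀ (c : Int),
      (PySem.List.pyRange (done.length : Int) (prices.length : Int) 1).foldl (fun cnt i =>
        let left_count : Int :=
          (((PySem.List.pyRange 0 i 1).filter
              (fun j => PySem.List.pyGetD prices j 0 < PySem.List.pyGetD prices i 0)).length : Int)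
        let right_count : Int :=
          (((PySem.List.pyRange (i+1) (prices.length : Int) 1).filter
              (fun j => PySem.List.pyGetD prices j 0 < PySem.List.pyGetD prices i 0)).length : Int)
        if left_count ≥ k ∧ right_count ≥ k then cnt + 1 else cnt) c
      = c + refList done rest k := by
  intro rest
  induction rest with
  | nil =>
    intro done hpr c
    have : (prices.length : Int) ≤ (done.length : Int) := by simp [hpr]
    rw [PySem.List.pyRange_one_eq_nil this]
    simp [refList]
  | cons x r ih =>
    intro done hpr c
    have hlen : done.length < prices.length := by simp [hpr]
    have hstep : PySem.List.pyRange (done.length : Int) (prices.length : Int) 1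
        = (done.length : Int) :: PySem.List.pyRange ((done.length : Int) + 1) (prices.length : Int) 1 :=
      PySem.List.pyRange_one_cons (by exact_mod_cast hlen)
    have hx : PySem.List.pyGetD prices ((done.length : Nat) : Int) 0 = x := by
      rw [PySem.List.pyGetD_natCast, hpr]
      rw [List.getD_eq_getElem _ 0 (by simp)]
      rw [List.getElem_append_right (by omega)]
      simp
    have htake : prices.take done.length = done := by
      rw [hpr]; simp
    have hdrop : prices.drop (done.length + 1) = r := by
      rw [hpr]
      have h1 := List.drop_append (l₁ := done) (l₂ := x :: r) (i := 1)
      simp at h1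
      simpa using h1
    rw [hstep, List.foldl_cons]
    have hleft := filter_length_take prices x done.length (le_of_lt hlen)
    have hright := filter_length_drop prices x (done.length + 1)
    have hnext : ((done ++ [x]).length : Int) = (done.length : Int) + 1 := by
      simp
    push_cast at hright
    have := ih (done ++ [x]) (by simp [hpr])
    simp only [hnext] at this
    simp only [hx, hleft, hright, htake, hdrop]
    rw [this]
    rw [refList]
    simp only [ge_iff_le]
    split_ifs with h
    · ring
    · ring

-- ===== VERDICT (by name: the statement is the Claim_ definition above) =====
theorem count_k_spikes_spec : Claim_equal_count_k_spikes := by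
  intro prices k _
  unfold Spec_count_k_spikes
  have hA : count_k_spikes prices k = refList [] prices k := by
    unfold count_k_spikes
    have := loopA_spec prices k prices [] (by simp) 0
    simpa using this
  have hB : count_k_spikes_alt prices k = refList [] prices k := by
    unfold count_k_spikes_alt
    obtain ⟨s', heq, hp', hs'⟩ := loop1_spec prices [] [] [] (List.Perm.refl _) (List.Pairwise.nil)
    rw [heq]
    simp only [List.nil_append] at hp' ⊢
    have h2 := loop2_spec k prices [] 0 s' hp' hs'
    simpa using h2
  rw [hA, hB]
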